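-- pv_equiv track=rewrite | github.com/mohamed-myi/Contribution-Matcher | contribution_matcher/parsing/issue_parser.py | categorize_technologies
-- ===== SOURCE A (Python) =====
-- from typing import Dict, List, Optional, Tuple
--
-- def categorize_technologies(technologies: List[Tuple[str, Optional[str]]]) -> Dict[str, List[str]]:
--     """
--     Group technologies by category.
--
--     Returns:
--         Dictionary mapping category to list of technologies
--     """
--     categorized = {}
--     for tech, category in technologies:
--         if category:
--             if category not in categorized:
--                 categorized[category] = []
--             if tech not in categorized[category]:
--                 categorized[category].append(tech)
--         else:
--             # Uncategorized
--             if "uncategorized" not in categorized: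
--                 categorized["uncategorized"] = []
--             if tech not in categorized["uncategorized"]:
--                 categorized["uncategorized"].append(tech)
--     return categorized
-- ===== SOURCE B (Python) =====
-- from typing import Dict, List, Optional, Tuple
--
-- def categorize_technologies(technologies: List[Tuple[str, Optional[str]]]) -> Dict[str, List[str]]:
--     """Group technologies by category, deferring deduplication to a second pass."""
--     grouped = {}
--     for tech, category in technologies:
--         grouped.setdefault(category if category else "uncategorized", []).append(tech)
--     return {key: list(dict.fromkeys(vals)) for key, vals in grouped.items()}
-- ===== Notes on version B (the rewrite author's own statement) =====
-- stated objective: idiomatic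
-- what changed: B groups every tech with setdefault/append (no membership test during the loop) and deduplicates each group afterwards in one dict.fromkeys pass, instead of A's inline not-in scan of the growing list on every append.
import Mathlib
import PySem

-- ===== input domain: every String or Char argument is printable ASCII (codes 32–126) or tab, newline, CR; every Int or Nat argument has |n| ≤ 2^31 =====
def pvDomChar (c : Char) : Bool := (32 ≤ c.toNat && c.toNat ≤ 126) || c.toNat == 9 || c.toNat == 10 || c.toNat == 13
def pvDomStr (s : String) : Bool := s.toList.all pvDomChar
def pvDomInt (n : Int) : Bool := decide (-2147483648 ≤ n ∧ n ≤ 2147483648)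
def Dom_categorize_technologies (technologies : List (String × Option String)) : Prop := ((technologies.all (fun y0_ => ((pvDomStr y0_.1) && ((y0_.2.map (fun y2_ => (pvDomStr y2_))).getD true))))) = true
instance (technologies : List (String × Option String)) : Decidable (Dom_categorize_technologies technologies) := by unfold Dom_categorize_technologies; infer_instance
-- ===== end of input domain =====

-- B groups with setdefault/append (no membership check in the loop) and deduplicates each group in a second pass; objective: idiomatic decomposition, same order of growth.

-- ===== PORT A =====
-- the loop body A writes out twice (once for the category, once for the "uncategorized" branch)
def pvAStep (d : PySem.Dict String (List String)) (tech key : String) :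
    PySem.Dict String (List String) :=
  let d1 := if d.contains key then d else d.insert key []
  let cur := d1.getD key []
  if tech ∈ cur then d1 else d1.insert key (cur ++ [tech])

def categorize_technologies (technologies : List (String × Option String)) : List (String × List String) :=
  (technologies.foldl (fun d p =>
      match p.2 with
      | some c => if c ≠ "" then pvAStep d p.1 c else pvAStep d p.1 "uncategorized"
      | none => pvAStep d p.1 "uncategorized")
    PySem.Dict.empty).items

-- ===== PORT B =====
-- `category if category else "uncategorized"` (None and "" are falsy)
def pvBKey (category : Option String) : String :=
  match category with
  | some c => if c ≠ "" then c else "uncategorized"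
  | none => "uncategorized"

def categorize_technologies_alt (technologies : List (String × Option String)) : List (String × List String) :=
  let grouped := technologies.foldl (fun d p =>
      let k := pvBKey p.2
      d.insert k (d.getD k [] ++ [p.1]))   -- grouped.setdefault(k, []).append(tech)
    PySem.Dict.empty
  grouped.items.map (fun p => (p.1, PySem.List.dedup p.2))  -- {k: list(dict.fromkeys(v)) …}

-- ===== PRECONDITION & SPEC =====
def Spec_categorize_technologies (technologies : List (String × Option String)) (out : List (String × List String)) : Prop := out = categorize_technologies_alt technologies
instance (technologies : List (String × Option String)) (out : List (String × List String)) : Decidable (Spec_categorize_technologies technologies out) := by unfold Spec_categorize_technologies; infer_instance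

-- ===== CLAIM (what is proved, stated in full; the proofs are below) =====
def Claim_equal_categorize_technologies : Prop := ∀ (technologies : List (String × Option String)), Dom_categorize_technologies technologies → Spec_categorize_technologies technologies (categorize_technologies technologies)

-- ===== LEMMAS AND PROOFS =====

-- the value map collapsing B's grouped lists to A's inline-deduplicated ones
def pvF (p : String × List String) : String × List String := (p.1, PySem.List.dedup p.2)

theorem pv_dedup_append_singleton (xs : List String) (t : String) :
    PySem.Set.ofList (xs ++ [t]) =
      if t ∈ xs then PySem.Set.ofList xs else PySem.Set.ofList xs ++ [t] := by
  simp only [PySem.Set.ofList_eq_foldl, List.foldl_append, List.foldl_cons, List.foldl_nil]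
  rw [PySem.Set.add, ← PySem.Set.ofList_eq_foldl]
  by_cases h : t ∈ xs <;> simp [pysem, h]

theorem pv_keys_eq {dA dB : PySem.Dict String (List String)}
    (h : dA.items = dB.items.map pvF) : dA.keys = dB.keys := by
  simp only [PySem.Dict.keys, h, List.map_map]; rfl

theorem pv_step (dA dB : PySem.Dict String (List String)) (tech k : String)
    (hnd : dB.keys.Nodup) (h : dA.items = dB.items.map pvF) :
    (pvAStep dA tech k).items
      = (dB.insert k (dB.getD k [] ++ [tech])).items.map pvF := by
  have hk : dA.contains k = dB.contains k := by
    rw [PySem.Dict.contains_eq_decide_mem_keys, PySem.Dict.contains_eq_decide_mem_keys,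
      pv_keys_eq h]
  have hndA : dA.keys.Nodup := by rw [pv_keys_eq h]; exact hnd
  by_cases hc : dB.contains k = true
  · obtain ⟨v, hv⟩ : ∃ v, dB.get? k = some v := by
      have := PySem.Dict.contains_eq_isSome_get? (d := dB) (k := k)
      rw [hc] at this
      exact Option.isSome_iff_exists.mp this.symm
    have hvmem : (k, v) ∈ dB.items := PySem.Dict.mem_items_of_get?_eq_some dB hv
    have hgB : dB.getD k [] = v := PySem.Dict.getD_of_get?_eq_some dB [] hv
    have hAmem : (k, PySem.List.dedup v) ∈ dA.items := by
      rw [h]; exact List.mem_map_of_mem hvmem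
    have hgA : dA.getD k [] = PySem.List.dedup v :=
      PySem.Dict.getD_of_mem_items _ hAmem hndA []
    have huniq : ∀ p ∈ dB.items, p.1 = k → p = (k, v) := by
      intro p hp hpk
      have := PySem.Dict.get?_of_mem_items _ (hpk ▸ hp : (k, p.2) ∈ dB.items) hnd
      rw [hv] at this
      obtain ⟨p1, p2⟩ := p; cases hpk; cases this; rfl
    simp only [pvAStep, hk, hc, if_true, hgA, hgB]
    by_cases ht : tech ∈ v
    · have ht' : tech ∈ PySem.List.dedup v := (PySem.List.mem_dedup v tech).mpr ht
      rw [if_pos ht', PySem.Dict.items_insert_of_contains _ _ hc, h, List.map_map]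
      refine (List.map_congr_left ?_).symm
      intro p hp
      by_cases hpk : p.1 = k
      · have hpv := huniq p hp hpk
        subst hpv
        simp [pvF]
        rw [pv_dedup_append_singleton, if_pos ht]
      · simp [Function.comp, hpk, pvF]
    · have ht' : tech ∉ PySem.List.dedup v := fun hx => ht ((PySem.List.mem_dedup v tech).mp hx)
      rw [if_neg ht', PySem.Dict.items_insert_of_contains _ _ (hk ▸ hc),
        PySem.Dict.items_insert_of_contains _ _ hc, h, List.map_map, List.map_map]
      refine List.map_congr_left ?_
      intro p hp
      by_cases hpk : p.1 = k
      · have hpv := huniq p hp hpk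
        subst hpv
        simp [pvF]
        rw [pv_dedup_append_singleton, if_neg ht]
      · simp [Function.comp, hpk, pvF]
  · have hc' : dB.contains k = false := by simpa using hc
    have hcA : dA.contains k = false := hk ▸ hc'
    have hgB : dB.getD k [] = [] := PySem.Dict.getD_of_not_contains dB [] hc'
    simp only [pvAStep, hcA, Bool.false_eq_true, if_false, PySem.Dict.getD_insert_self,
      List.not_mem_nil, List.nil_append, PySem.Dict.insert_insert_self, hgB]
    rw [PySem.Dict.items_insert_of_not_contains _ _ hcA,
      PySem.Dict.items_insert_of_not_contains _ _ hc', List.map_append, h]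
    simp [pvF, pysem]

theorem pv_loop (ts : List (String × Option String))
    (dA dB : PySem.Dict String (List String))
    (hnd : dB.keys.Nodup) (h : dA.items = dB.items.map pvF) :
    (ts.foldl (fun d p =>
      match p.2 with
      | some c => if c ≠ "" then pvAStep d p.1 c else pvAStep d p.1 "uncategorized"
      | none => pvAStep d p.1 "uncategorized") dA).items
    = (ts.foldl (fun d p =>
        let k := pvBKey p.2
        d.insert k (d.getD k [] ++ [p.1])) dB).items.map pvF := by
  induction ts generalizing dA dB with
  | nil => simpa using h
  | cons p rest ih =>
    simp only [List.foldl_cons]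
    have hstep : (match p.2 with
      | some c => if c ≠ "" then pvAStep dA p.1 c else pvAStep dA p.1 "uncategorized"
      | none => pvAStep dA p.1 "uncategorized") = pvAStep dA p.1 (pvBKey p.2) := by
      cases hp : p.2 with
      | none => rfl
      | some c => by_cases hc : c = "" <;> simp [pvBKey, hc]
    rw [hstep]
    refine ih _ _ ?_ ?_
    · exact PySem.Dict.nodup_keys_insert _ _ _ hnd
    · exact pv_step dA dB p.1 (pvBKey p.2) hnd h

-- ===== VERDICT (by name: the statement is the Claim_ definition above) =====
theorem categorize_technologies_spec : Claim_equal_categorize_technologies := by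
  intro ts _
  unfold Spec_categorize_technologies categorize_technologies categorize_technologies_alt
  exact pv_loop ts PySem.Dict.empty PySem.Dict.empty (by simp) rfl
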